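-- pv_equiv track=rewrite | github.com/ilyavtln/scholl-numerical-modeling-of-dynamic-systems | codewars_find_the_unique_number_1/solution.py | find_uniq
-- ===== SOURCE A (Python) =====
-- def find_uniq(arr):
--     for i in range(0, len(arr)):
--         for j in range(i + 1, len(arr)):
--             if arr[i] != arr[j]:
--                 n = arr[i]
--             else:
--                 break
--     return n   # n: unique number in the array
-- ===== SOURCE B (Python) =====
-- def find_uniq(arr):
--     # single backward pass: first (i.e. largest) index i with arr[i] != arr[i+1]
--     for i in range(len(arr) - 2, -1, -1):
--         if arr[i] != arr[i + 1]:
--             return arr[i]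
-- ===== Notes on version B (the rewrite author's own statement) =====
-- stated objective: faster
-- what changed: Replaces the nested quadratic scan (whose net effect is to remember arr[i] for the last i with arr[i] != arr[i+1]) by a single backward pass that returns the first such arr[i] from the right.
import Mathlib
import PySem

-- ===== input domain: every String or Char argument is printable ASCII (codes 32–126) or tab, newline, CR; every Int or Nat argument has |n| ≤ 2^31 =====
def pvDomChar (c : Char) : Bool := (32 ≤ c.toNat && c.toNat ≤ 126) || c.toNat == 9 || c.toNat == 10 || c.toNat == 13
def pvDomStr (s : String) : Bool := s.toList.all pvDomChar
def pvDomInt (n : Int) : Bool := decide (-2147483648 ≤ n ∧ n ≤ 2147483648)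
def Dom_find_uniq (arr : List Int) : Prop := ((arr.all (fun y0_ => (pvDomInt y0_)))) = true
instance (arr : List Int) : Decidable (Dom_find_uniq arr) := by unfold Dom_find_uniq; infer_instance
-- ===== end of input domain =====

-- B replaces A's nested quadratic scan by a single backward pass returning arr[i]
-- at the largest i with arr[i] != arr[i+1] (the value A's loops end up keeping).

-- ===== PORT A =====
-- inner 'for j in range(i+1, len(arr))' loop with its break; n is the possibly-unassigned
-- variable (none = not yet assigned); arr[j] via pyGetD (j always in range here, so exact)
def pvInnerA (arr : List Int) (ai : Int) : List Int → Option Int → Option Int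
  | [], n => n
  | j :: rest, n =>
      if ai ≠ PySem.List.pyGetD arr j 0 then pvInnerA arr ai rest (some ai)
      else n

def find_uniq (arr : List Int) : Int :=
  (((PySem.List.pyRange 0 (arr.length : Int) 1).foldl
      (fun n i =>
        pvInnerA arr (PySem.List.pyGetD arr i 0)
          (PySem.List.pyRange (i + 1) (arr.length : Int) 1) n)
      none)).getD 0
  -- none here = Python's UnboundLocalError; those inputs are excluded by Pre_find_uniq

-- ===== PORT B =====
-- 'for i in range(len(arr)-2, -1, -1): if arr[i] != arr[i+1]: return arr[i]'
-- (falling off the end returns Python None; excluded by Pre_find_uniq, ported as 0)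
def pvScanB (arr : List Int) : List Int → Int
  | [] => 0
  | i :: rest =>
      if PySem.List.pyGetD arr i 0 ≠ PySem.List.pyGetD arr (i + 1) 0 then
        PySem.List.pyGetD arr i 0
      else pvScanB arr rest

def find_uniq_alt (arr : List Int) : Int :=
  pvScanB arr (PySem.List.pyRange ((arr.length : Int) - 2) (-1) (-1))

-- ===== PRECONDITION & SPEC =====
-- Pre_ excludes exactly the inputs where Python A raises UnboundLocalError (n never
-- assigned): arrays with no adjacent unequal pair (all elements equal, or length < 2).
def Pre_find_uniq (arr : List Int) : Prop := ¬ List.IsChain (· = ·) arr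
instance (arr : List Int) : Decidable (Pre_find_uniq arr) := by unfold Pre_find_uniq; infer_instance
def pvWitness_find_uniq : List Int := [1, 1, 2]

def Spec_find_uniq (arr : List Int) (out : Int) : Prop := out = find_uniq_alt arr
instance (arr : List Int) (out : Int) : Decidable (Spec_find_uniq arr out) := by unfold Spec_find_uniq; infer_instance

-- ===== CLAIM (what is proved, stated in full; the proofs are below) =====
def Claim_equal_find_uniq : Prop := ∀ (arr : List Int), Dom_find_uniq arr → Pre_find_uniq arr → Spec_find_uniq arr (find_uniq arr)

-- ===== LEMMAS AND PROOFS =====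

-- once n = some ai, the inner loop can only return some ai
lemma pvInnerA_absorb (arr : List Int) (ai : Int) (js : List Int) :
    pvInnerA arr ai js (some ai) = some ai := by
  induction js with
  | nil => rfl
  | cons j rest ih =>
      simp only [pvInnerA]
      split
      · exact ih
      · rfl

-- the inner loop's net effect is decided by its first comparison
lemma pvInnerA_cons (arr : List Int) (ai j : Int) (rest : List Int) (n : Option Int) :
    pvInnerA arr ai (j :: rest) n =
      if ai ≠ PySem.List.pyGetD arr j 0 then some ai else n := by
  simp only [pvInnerA]
  split
  · exact pvInnerA_absorb arr ai rest
  · rfl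

-- A's fold equals a simple conditional-overwrite fold over range(0, len-1)
lemma find_uniq_eq_fold (arr : List Int) :
    find_uniq arr =
      (((PySem.List.pyRange 0 ((arr.length : Int) - 1) 1).foldl
          (fun n i =>
            if PySem.List.pyGetD arr i 0 ≠ PySem.List.pyGetD arr (i + 1) 0 then
              some (PySem.List.pyGetD arr i 0)
            else n)
          none)).getD 0 := by
  unfold find_uniq
  rcases Nat.eq_zero_or_pos arr.length with h0 | hpos
  · rw [h0]
    rfl
  · have h1 : (0 : Int) ≤ (arr.length : Int) - 1 := by omega
    have hsplit : PySem.List.pyRange 0 (arr.length : Int) 1 =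
        PySem.List.pyRange 0 ((arr.length : Int) - 1) 1 ++ [(arr.length : Int) - 1] := by
      have := PySem.List.pyRange_one_succ_right (a := 0) (b := (arr.length : Int) - 1) h1
      have e : ((arr.length : Int) - 1) + 1 = (arr.length : Int) := by ring
      rw [e] at this
      exact this
    rw [hsplit, List.foldl_append]
    simp only [List.foldl_cons, List.foldl_nil]
    -- the last outer iteration (i = len-1) has an empty inner range and is a no-op
    have hnil : PySem.List.pyRange (((arr.length : Int) - 1) + 1) (arr.length : Int) 1 = [] :=
      PySem.List.pyRange_one_eq_nil (by omega)
    rw [hnil]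
    simp only [pvInnerA]
    -- on every i in range(0, len-1) the inner loop reduces to the first comparison
    congr 1
    apply List.foldl_ext
    intro n i hi
    have hm := (PySem.List.mem_pyRange_one).mp hi
    rw [PySem.List.pyRange_one_cons (by omega : i + 1 < (arr.length : Int))]
    exact pvInnerA_cons arr _ _ _ n

-- B over its countdown range is the scan of the reversed range(0, len-1)
lemma find_uniq_alt_eq (arr : List Int) :
    find_uniq_alt arr =
      pvScanB arr (PySem.List.pyRange 0 ((arr.length : Int) - 1) 1).reverse := by
  unfold find_uniq_alt
  rw [PySem.List.pyRange_neg_one_eq_reverse]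
  have e : (arr.length : Int) - 2 + 1 = (arr.length : Int) - 1 := by ring
  rw [e]
  norm_num

-- conditional-overwrite fold from the left = first match on the reversed list
lemma fold_eq_scan (arr : List Int) (l : List Int) :
    (((l.foldl
        (fun n i =>
          if PySem.List.pyGetD arr i 0 ≠ PySem.List.pyGetD arr (i + 1) 0 then
            some (PySem.List.pyGetD arr i 0)
          else n)
        none)).getD 0) = pvScanB arr l.reverse := by
  induction l using List.reverseRecOn with
  | nil => rfl
  | append_singleton l' a ih =>
      rw [List.foldl_append, List.reverse_append]
      simp only [List.foldl_cons, List.foldl_nil, List.reverse_singleton, List.singleton_append,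
        pvScanB]
      split
      · rfl
      · exact ih

-- ===== VERDICT (by name: the statement is the Claim_ definition above) =====
theorem find_uniq_spec : Claim_equal_find_uniq := by
  intro arr _ _
  unfold Spec_find_uniq
  rw [find_uniq_eq_fold, fold_eq_scan, find_uniq_alt_eq]
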